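-- pv_equiv track=rewrite | github.com/bcorfman/freytag-forge | storygame/cli.py | _with_paragraph_spacing
-- ===== SOURCE A (Python) =====
-- def _with_paragraph_spacing(lines: list[str]) -> list[str]:
--     if len(lines) <= 1:
--         return list(lines)
--     spaced: list[str] = []
--     for index, line in enumerate(lines):
--         spaced.append(line)
--         if index < len(lines) - 1:
--             spaced.append("")
--     return spaced
-- ===== SOURCE B (Python) =====
-- def _with_paragraph_spacing(lines: list[str]) -> list[str]:
--     # Index-driven construction: the output has 2n-1 slots; even slots hold
--     # the lines, odd slots hold the blank separators.
--     if not lines: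
--         return []
--     return ["" if i % 2 else lines[i // 2] for i in range(2 * len(lines) - 1)]
-- ===== Notes on version B (the rewrite author's own statement) =====
-- stated objective: alternative
-- what changed: Replaces the accumulator loop with its per-element last-index branch by an index-driven construction: the output's 2n-1 slots are computed directly from their positions (even slot i holds lines[i//2], odd slots hold the blank separator).
import Mathlib
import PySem

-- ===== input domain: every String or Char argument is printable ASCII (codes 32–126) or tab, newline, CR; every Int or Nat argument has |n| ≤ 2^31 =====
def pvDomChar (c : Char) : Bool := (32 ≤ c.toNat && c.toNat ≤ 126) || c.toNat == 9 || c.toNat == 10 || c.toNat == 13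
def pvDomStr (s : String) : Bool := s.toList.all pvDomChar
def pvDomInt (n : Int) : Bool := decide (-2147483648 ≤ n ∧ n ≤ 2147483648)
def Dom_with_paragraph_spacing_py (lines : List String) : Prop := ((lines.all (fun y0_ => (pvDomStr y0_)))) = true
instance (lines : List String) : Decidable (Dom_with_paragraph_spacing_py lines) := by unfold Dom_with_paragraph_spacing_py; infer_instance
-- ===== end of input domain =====

-- B replaces A's accumulator loop (append line, append "" unless last) by an index-driven
-- construction: output slot i is lines[i//2] when i is even, "" when i is odd (alternative decomposition).

-- ===== PORT A =====
-- Literal port of A: early return on len<=1, else a fold over enumerate appending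
-- the line and a "" when index < len-1.
def with_paragraph_spacing_py (lines : List String) : List String :=
  if lines.length ≤ 1 then lines
  else
    (PySem.List.enumerate lines).foldl
      (fun spaced p =>
        (spaced ++ [p.2]) ++ (if p.1 < (lines.length : Int) - 1 then [""] else []))
      []

-- ===== PORT B =====
-- Literal port of B: comprehension over range(2*len-1); the pyGet? index i//2 is
-- always in range here, so the .getD default is never used (exact).
def with_paragraph_spacing_py_alt (lines : List String) : List String :=
  if lines = [] then []
  else
    (PySem.List.pyRange 0 (2 * (lines.length : Int) - 1) 1).map
      (fun i => if PySem.Int.mod i 2 ≠ 0 then ""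
                else (PySem.List.pyGet? lines (PySem.Int.floordiv i 2)).getD "")

-- ===== PRECONDITION & SPEC =====
def Spec_with_paragraph_spacing_py (lines : List String) (out : List String) : Prop := out = with_paragraph_spacing_py_alt lines
instance (lines : List String) (out : List String) : Decidable (Spec_with_paragraph_spacing_py lines out) := by unfold Spec_with_paragraph_spacing_py; infer_instance

-- ===== CLAIM (what is proved, stated in full; the proofs are below) =====
def Claim_equal_with_paragraph_spacing_py : Prop := ∀ (lines : List String), Dom_with_paragraph_spacing_py lines → Spec_with_paragraph_spacing_py lines (with_paragraph_spacing_py lines)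

-- ===== LEMMAS AND PROOFS =====

-- Reference interleave, used only by the proofs as a middle term.
def pvInter : List String → List String
  | [] => []
  | [x] => [x]
  | x :: y :: rest => x :: "" :: pvInter (y :: rest)

lemma pv_fold_lem (xs : List String) (s : Int) (n : Int) (acc : List String)
    (h : s + xs.length = n) :
    (PySem.List.enumerate xs s).foldl
      (fun spaced p => (spaced ++ [p.2]) ++ (if p.1 < n - 1 then [""] else [])) acc
    = acc ++ pvInter xs := by
  induction xs generalizing s acc with
  | nil => simp [PySem.List.enumerate_nil, pvInter]
  | cons x rest ih =>
    rw [PySem.List.enumerate_cons]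
    simp only [List.foldl_cons]
    cases rest with
    | nil =>
      have : ¬ (s < n - 1) := by simp at h; omega
      simp [PySem.List.enumerate_nil, this, pvInter]
    | cons y ys =>
      have hlt : s < n - 1 := by simp at h; omega
      rw [if_pos hlt]
      rw [ih (s+1) (acc ++ [x] ++ [""]) (by simp at h ⊢; omega)]
      simp [pvInter]

lemma pv_slot_even (lines : List String) (k : Nat) (hk : k < lines.length) :
    (if PySem.Int.mod (2 * (k : Int)) 2 ≠ 0 then ""
     else (PySem.List.pyGet? lines (PySem.Int.floordiv (2 * (k : Int)) 2)).getD "")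
    = lines[k] := by
  rw [PySem.Int.mod_eq_emod_of_pos (by norm_num), PySem.Int.floordiv_eq_ediv_of_pos (by norm_num)]
  have hm : (2 * (k : Int)) % 2 = 0 := by omega
  have hdv : (2 * (k : Int)) / 2 = (k : Int) := by omega
  simp [hm, hdv, PySem.List.pyGet?_natCast, List.getElem?_eq_getElem hk]

lemma pv_slot_odd (lines : List String) (k : Nat) :
    (if PySem.Int.mod (2 * (k : Int) + 1) 2 ≠ 0 then ""
     else (PySem.List.pyGet? lines (PySem.Int.floordiv (2 * (k : Int) + 1) 2)).getD "")
    = "" := by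
  rw [PySem.Int.mod_eq_emod_of_pos (by norm_num)]
  have hm : (2 * (k : Int) + 1) % 2 = 1 := by omega
  simp [hm]

lemma pv_map_lem (lines : List String) (k : Nat) (xs : List String)
    (hd : lines.drop k = xs) :
    (PySem.List.pyRange (2 * (k : Int)) (2 * (lines.length : Int) - 1) 1).map
      (fun i => if PySem.Int.mod i 2 ≠ 0 then ""
                else (PySem.List.pyGet? lines (PySem.Int.floordiv i 2)).getD "")
    = pvInter xs := by
  induction xs generalizing k with
  | nil =>
    have hk : lines.length ≤ k := by
      by_contra hlt
      have := List.drop_eq_nil_iff.mp hd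
      omega
    rw [PySem.List.pyRange_one_eq_nil (by omega)]
    simp [pvInter]
  | cons x rest ih =>
    have hk : k < lines.length := by
      by_contra hge
      rw [List.drop_eq_nil_iff.mpr (by omega)] at hd
      simp at hd
    have hx : lines[k] = x := by
      have h0 : (lines.drop k)[0]? = some x := by rw [hd]; rfl
      rw [List.getElem?_drop] at h0
      simpa [List.getElem?_eq_getElem hk] using h0
    have hdrop : lines.drop (k + 1) = rest := by
      have h1 : (lines.drop k).drop 1 = rest := by rw [hd]; rfl
      rw [List.drop_drop] at h1
      simpa [Nat.add_comm] using h1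
    cases rest with
    | nil =>
      have hn : lines.length = k + 1 := by
        have := List.drop_eq_nil_iff.mp hdrop
        omega
      rw [PySem.List.pyRange_one_cons (by omega)]
      rw [PySem.List.pyRange_one_eq_nil (by omega)]
      simp only [List.map_cons, List.map_nil]
      rw [pv_slot_even lines k hk, hx]
      rfl
    | cons y ys =>
      have hk1 : k + 1 < lines.length := by
        by_contra hge
        rw [List.drop_eq_nil_iff.mpr (by omega)] at hdrop
        simp at hdrop
      rw [PySem.List.pyRange_one_cons (by omega)]
      rw [PySem.List.pyRange_one_cons (by omega)]
      simp only [List.map_cons]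
      rw [pv_slot_even lines k hk, hx]
      have harith : (2 * (k : Int) + 1 + 1) = 2 * ((k + 1 : Nat) : Int) := by push_cast; ring
      rw [show (2 * (k : Int) + 1) = 2 * (k : Int) + 1 from rfl, pv_slot_odd lines k,
        harith, ih (k + 1) hdrop]
      rfl

-- ===== VERDICT (by name: the statement is the Claim_ definition above) =====
theorem with_paragraph_spacing_py_spec : Claim_equal_with_paragraph_spacing_py := by
  intro lines _
  unfold Spec_with_paragraph_spacing_py with_paragraph_spacing_py with_paragraph_spacing_py_alt
  match lines with
  | [] => simp
  | [x] =>
    rw [if_pos (by simp), if_neg (by simp)]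
    have := pv_map_lem [x] 0 [x] rfl
    simpa [pvInter] using this.symm
  | x :: y :: rest =>
    rw [if_neg (by simp), if_neg (by simp)]
    rw [pv_fold_lem _ 0 (((x :: y :: rest).length : Int)) [] (by simp)]
    have := pv_map_lem (x :: y :: rest) 0 (x :: y :: rest) rfl
    simpa using this.symm
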